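-- pv_equiv track=rewrite | github.com/Navaneethveer3/ConfidAI-Backend | interviews/views.py | generate_project_questions
-- ===== SOURCE A (Python) =====
-- def generate_project_questions(projects):
--     """Dynamically generate project-based questions."""
--     questions = []
--     for project in projects:
--         questions.append({"text": f"Can you explain the working of your project ?", "type": "project"})
--         questions.append({"text": f"What challenges did you face in your project?", "type": "project"})
--         questions.append({"text": f"What technologies did you use in your projects?", "type": "project"})
--         questions.append({"text": f"How did you test and debug in your projects?", "type": "project"})
--         questions.append({"text": f"What improvements can be made in your projects?", "type": "project"})
--         questions.append({"text": f"How does it differ from similar projects?", "type": "project"})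
--
--     return questions[:6]
-- ===== SOURCE B (Python) =====
-- _TEXTS = (
--     "Can you explain the working of your project ?",
--     "What challenges did you face in your project?",
--     "What technologies did you use in your projects?",
--     "How did you test and debug in your projects?",
--     "What improvements can be made in your projects?",
--     "How does it differ from similar projects?",
-- )
--
--
-- def generate_project_questions(projects):
--     """The [:6] cap means only the presence of a first project matters:
--     if the iterable yields anything, the answer is the six fixed questions."""
--     if not any(True for _ in projects):
--         return []
--     return [{"text": t, "type": "project"} for t in _TEXTS]
-- ===== Notes on version B (the rewrite author's own statement) =====
-- stated objective: faster
-- what changed: B removes A's loop over all projects: because the result is sliced to [:6] and every project contributes exactly 6 questions, B only tests whether the iterable yields a first element and then maps a fixed 6-tuple of question texts to dicts, instead of building 6*n dicts and slicing.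
import Mathlib
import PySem

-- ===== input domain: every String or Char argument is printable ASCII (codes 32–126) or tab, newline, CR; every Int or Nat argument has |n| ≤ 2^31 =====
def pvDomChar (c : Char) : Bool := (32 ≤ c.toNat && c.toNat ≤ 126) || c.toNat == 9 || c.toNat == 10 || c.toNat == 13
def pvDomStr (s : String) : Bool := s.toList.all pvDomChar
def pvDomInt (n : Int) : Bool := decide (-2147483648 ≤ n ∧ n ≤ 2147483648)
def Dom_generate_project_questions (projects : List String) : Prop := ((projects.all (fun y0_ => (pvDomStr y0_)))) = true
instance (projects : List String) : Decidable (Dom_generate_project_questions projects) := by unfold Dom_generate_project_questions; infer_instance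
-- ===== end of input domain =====

-- B removes A's loop over all projects: the [:6] cap makes only the presence of a first
-- project matter, so B tests emptiness and maps six fixed texts to question dicts (faster: O(1) vs O(n)).

-- ===== PORT A =====
-- literal port of A: one fold over the projects, each step appending the six dict literals
-- in order, then questions[:6]
def generate_project_questions (projects : List String) : List (List (String × String)) :=
  (projects.foldl
    (fun questions _ =>
      ((((((questions
        ++ [[("text", "Can you explain the working of your project ?"), ("type", "project")]])
        ++ [[("text", "What challenges did you face in your project?"), ("type", "project")]])
        ++ [[("text", "What technologies did you use in your projects?"), ("type", "project")]])
        ++ [[("text", "How did you test and debug in your projects?"), ("type", "project")]])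
        ++ [[("text", "What improvements can be made in your projects?"), ("type", "project")]])
        ++ [[("text", "How does it differ from similar projects?"), ("type", "project")]]))
    []).take 6

-- ===== PORT B =====
-- the six fixed question texts of Source B
def pvTexts : List String :=
  [ "Can you explain the working of your project ?"
  , "What challenges did you face in your project?"
  , "What technologies did you use in your projects?"
  , "How did you test and debug in your projects?"
  , "What improvements can be made in your projects?"
  , "How does it differ from similar projects?" ]

-- literal port of Source B: emptiness test, then a map of the fixed texts to dicts
def generate_project_questions_alt (projects : List String) : List (List (String × String)) :=
  if projects.isEmpty then []
  else pvTexts.map (fun t => [("text", t), ("type", "project")])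

-- ===== PRECONDITION & SPEC =====
def Spec_generate_project_questions (projects : List String) (out : List (List (String × String))) : Prop := out = generate_project_questions_alt projects
instance (projects : List String) (out : List (List (String × String))) : Decidable (Spec_generate_project_questions projects out) := by unfold Spec_generate_project_questions; infer_instance

-- ===== CLAIM =====
def Claim_equal_generate_project_questions : Prop := ∀ (projects : List String), Dom_generate_project_questions projects → Spec_generate_project_questions projects (generate_project_questions projects)

-- ===== LEMMAS AND PROOFS =====
-- a fold that appends a constant block each step only ever extends the accumulator on the right
theorem foldl_const_append_suffix {a b : Type} (blk : List b) (l : List a) (acc : List b) :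
    ∃ t, l.foldl (fun q _ => q ++ blk) acc = acc ++ t := by
  induction l generalizing acc with
  | nil => exact ⟨[], by simp⟩
  | cons x xs ih =>
    obtain ⟨t, ht⟩ := ih (acc ++ blk)
    exact ⟨blk ++ t, by simp [ht]⟩

-- ===== VERDICT =====
theorem generate_project_questions_spec : Claim_equal_generate_project_questions := by
  intro projects _
  unfold Spec_generate_project_questions generate_project_questions generate_project_questions_alt
  cases projects with
  | nil => simp
  | cons p rest =>
    rw [List.foldl_cons]
    simp only [List.append_assoc, List.nil_append]
    obtain ⟨t, ht⟩ := foldl_const_append_suffix _ rest _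
    rw [ht]
    rfl
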